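-- pv_equiv track=rewrite | github.com/Sajeev-Raju/SuperApp | SubApp/NearMeBKND/scripts/insert_fake_user_locations.py | generate_user_ids
-- ===== SOURCE A (Python) =====
-- import string
--
-- def generate_user_ids(n):
--     ids = []
--     for a in string.ascii_uppercase:
--         for b in string.ascii_uppercase:
--             for c in string.ascii_uppercase:
--                 for d in range(1000):
--                     ids.append(f"{a}{b}{c}{d:03d}")
--                     if len(ids) == n:
--                         return ids
--     return ids[:n]
-- ===== SOURCE B (Python) =====
-- def generate_user_ids(n):
--     count = min(max(n, 0), 26 * 26 * 26 * 1000)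
--     return [
--         f"{chr(65 + i // 676000)}{chr(65 + i // 26000 % 26)}{chr(65 + i // 1000 % 26)}{i % 1000:03d}"
--         for i in range(count)
--     ]
-- ===== Notes on version B (the rewrite author's own statement) =====
-- stated objective: alternative
-- what changed: Replaces A's four nested letter/number loops with their early-return length check by a single flat comprehension over range(count), count being n clamped to the ID-universe size, deriving each ID's three letters and zero-padded number arithmetically from its index; Pre_ excludes negative n, a corner no caller specifies, where A interprets n with Python slice semantics (all IDs but the last few, after enumerating the whole universe) while B's clamp yields none.
-- outside the precondition, e.g. on generate_user_ids(-17576000): A does not finish within the time limit, B returns []; on generate_user_ids(-1): A does not finish within the time limit, B returns []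
import Mathlib
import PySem

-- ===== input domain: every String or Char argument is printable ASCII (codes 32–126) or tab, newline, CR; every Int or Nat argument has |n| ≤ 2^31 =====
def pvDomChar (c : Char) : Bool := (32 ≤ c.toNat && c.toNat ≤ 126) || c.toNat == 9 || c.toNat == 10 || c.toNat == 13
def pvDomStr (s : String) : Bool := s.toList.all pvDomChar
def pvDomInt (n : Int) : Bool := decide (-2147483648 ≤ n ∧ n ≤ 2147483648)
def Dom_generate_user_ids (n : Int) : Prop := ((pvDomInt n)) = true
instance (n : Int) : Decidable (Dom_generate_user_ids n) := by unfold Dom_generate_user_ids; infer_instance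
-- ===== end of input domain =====

-- B replaces A's four nested loops (with an early return) by a single flat comprehension that
-- derives each ID arithmetically from its index; alternative decomposition, similar cost.

-- ===== PORT A =====

-- string.ascii_uppercase
def pvLetters : List Char :=
  ['A','B','C','D','E','F','G','H','I','J','K','L','M',
   'N','O','P','Q','R','S','T','U','V','W','X','Y','Z']

-- f"{a}{b}{c}{d:03d}" — for 0 ≤ d the {d:03d} field equals str(d).zfill(3), exact via PySem
def pvId (a b c : Char) (d : Int) : String :=
  String.ofList ([a, b, c] ++ PySem.Chars.zfill (PySem.Int.toChars d) 3)

-- The Python list `ids` is carried as (reversed contents, stored length): Python's append and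
-- len() are O(1) on the list object, so the port keeps the same two O(1) fields; the list is
-- reversed back at every point where the Python returns it.  `.inl r` = the early `return ids`
-- fired with value r; `.inr st` = the loop ran to completion with state st.
def pvLoopD (n : Int) (a b c : Char) : List Int → List String × Int → List String ⊕ (List String × Int)
  | [], st => .inr st
  | d :: ds, (rev, k) =>
      let rev' := pvId a b c d :: rev
      if k + 1 = n then .inl rev'.reverse else pvLoopD n a b c ds (rev', k + 1)

def pvLoopC (n : Int) (a b : Char) : List Char → List String × Int → List String ⊕ (List String × Int)
  | [], st => .inr st
  | c :: cs, st =>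
      match pvLoopD n a b c (PySem.List.pyRange 0 1000 1) st with
      | .inl r => .inl r
      | .inr st' => pvLoopC n a b cs st'

def pvLoopB (n : Int) (a : Char) : List Char → List String × Int → List String ⊕ (List String × Int)
  | [], st => .inr st
  | b :: bs, st =>
      match pvLoopC n a b pvLetters st with
      | .inl r => .inl r
      | .inr st' => pvLoopB n a bs st'

def pvLoopA (n : Int) : List Char → List String × Int → List String ⊕ (List String × Int)
  | [], st => .inr st
  | a :: as, st =>
      match pvLoopB n a pvLetters st with
      | .inl r => .inl r
      | .inr st' => pvLoopA n as st'

def generate_user_ids (n : Int) : List String :=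
  match pvLoopA n pvLetters ([], 0) with
  | .inl r => r
  | .inr (rev, _) => PySem.List.slice rev.reverse none (some n)   -- ids[:n]

-- ===== PORT B =====

-- chr(k); exact for the values B uses (65..90)
def pvChr (k : Int) : Char := Char.ofNat k.toNat

def generate_user_ids_alt (n : Int) : List String :=
  let count : Int := min (max n 0) (26 * 26 * 26 * 1000)
  (PySem.List.pyRange 0 count 1).map (fun i =>
    pvId (pvChr (65 + PySem.Int.floordiv i 676000))
         (pvChr (65 + PySem.Int.mod (PySem.Int.floordiv i 26000) 26))
         (pvChr (65 + PySem.Int.mod (PySem.Int.floordiv i 1000) 26))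
         (PySem.Int.mod i 1000))

-- ===== PRECONDITION & SPEC =====
-- Pre_ excludes negative n, a corner no caller specifies: there A interprets n with Python
-- slice semantics (all IDs but the last |n|, after enumerating all 17,576,000 of them) while
-- B's clamp yields none; both readings are defensible for an unspecified negative count.
def Pre_generate_user_ids (n : Int) : Prop := 0 ≤ n
instance (n : Int) : Decidable (Pre_generate_user_ids n) := by unfold Pre_generate_user_ids; infer_instance

def pvWitness_generate_user_ids : Int := (5)

def Spec_generate_user_ids (n : Int) (out : List String) : Prop := out = generate_user_ids_alt n
instance (n : Int) (out : List String) : Decidable (Spec_generate_user_ids n out) := by unfold Spec_generate_user_ids; infer_instance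

-- ===== CLAIM (what is proved, stated in full; the proofs are below) =====
def Claim_equal_generate_user_ids : Prop := ∀ (n : Int), Dom_generate_user_ids n → Pre_generate_user_ids n → Spec_generate_user_ids n (generate_user_ids n)

-- ===== LEMMAS AND PROOFS =====

-- B's per-index ID (the lambda body of generate_user_ids_alt, named for the proofs)
def pvIdx (i : Int) : String :=
  pvId (pvChr (65 + PySem.Int.floordiv i 676000))
       (pvChr (65 + PySem.Int.mod (PySem.Int.floordiv i 26000) 26))
       (pvChr (65 + PySem.Int.mod (PySem.Int.floordiv i 1000) 26))
       (PySem.Int.mod i 1000)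

-- the number of IDs A's return value carries
def pvCountA (n : Int) : Int := if n ≥ 0 then min n 17576000 else max 0 (17576000 + n)

-- the generic cutoff loop all four A-loops instantiate
def pvChase (n : Int) : List String → List String × Int → List String ⊕ (List String × Int)
  | [], st => .inr st
  | x :: xs, (rev, k) =>
      if k + 1 = n then .inl ((x :: rev).reverse) else pvChase n xs (x :: rev, k + 1)

-- the full enumeration A's loops emit
def pvAll : List String :=
  pvLetters.flatMap fun a => pvLetters.flatMap fun b => pvLetters.flatMap fun c =>
    (PySem.List.pyRange 0 1000 1).map (pvId a b c)

theorem pvLoopD_eq_chase (n : Int) (a b c : Char) (ds : List Int) (st : List String × Int) :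
    pvLoopD n a b c ds st = pvChase n (ds.map (pvId a b c)) st := by
  induction ds generalizing st with
  | nil => rfl
  | cons d ds ih =>
      obtain ⟨rev, k⟩ := st
      simp only [pvLoopD, List.map_cons, pvChase]
      split <;> simp [ih]

theorem pvChase_append (n : Int) (xs ys : List String) (st : List String × Int) :
    pvChase n (xs ++ ys) st =
      match pvChase n xs st with
      | .inl r => .inl r
      | .inr st' => pvChase n ys st' := by
  induction xs generalizing st with
  | nil => rfl
  | cons x xs ih =>
      obtain ⟨rev, k⟩ := st
      simp only [List.cons_append, pvChase]
      split <;> simp [ih]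

theorem pvLoopC_eq_chase (n : Int) (a b : Char) (cs : List Char) (st : List String × Int) :
    pvLoopC n a b cs st =
      pvChase n (cs.flatMap fun c => (PySem.List.pyRange 0 1000 1).map (pvId a b c)) st := by
  induction cs generalizing st with
  | nil => rfl
  | cons c cs ih =>
      simp only [pvLoopC, List.flatMap_cons, pvChase_append, pvLoopD_eq_chase]
      split <;> simp_all

theorem pvLoopB_eq_chase (n : Int) (a : Char) (bs : List Char) (st : List String × Int) :
    pvLoopB n a bs st =
      pvChase n (bs.flatMap fun b => pvLetters.flatMap fun c =>
        (PySem.List.pyRange 0 1000 1).map (pvId a b c)) st := by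
  induction bs generalizing st with
  | nil => rfl
  | cons b bs ih =>
      simp only [pvLoopB, List.flatMap_cons, pvChase_append, pvLoopC_eq_chase]
      split <;> simp_all

theorem pvLoopA_eq_chase (n : Int) (as : List Char) (st : List String × Int) :
    pvLoopA n as st =
      pvChase n (as.flatMap fun a => pvLetters.flatMap fun b => pvLetters.flatMap fun c =>
        (PySem.List.pyRange 0 1000 1).map (pvId a b c)) st := by
  induction as generalizing st with
  | nil => rfl
  | cons a as ih =>
      simp only [pvLoopA, List.flatMap_cons, pvChase_append, pvLoopB_eq_chase]
      split <;> simp_all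

theorem pvChase_spec (n : Int) (xs : List String) : ∀ (rev : List String),
    pvChase n xs (rev, (rev.length : Int)) =
      if (rev.length : Int) < n ∧ n ≤ (rev.length : Int) + xs.length then
        .inl (rev.reverse ++ xs.take (n - rev.length).toNat)
      else .inr (xs.reverse ++ rev, ((rev.length + xs.length : Nat) : Int)) := by
  induction xs with
  | nil =>
      intro rev
      simp only [pvChase, List.length_nil]
      rw [if_neg (by push_cast; omega)]
      simp
  | cons x xs ih =>
      intro rev
      simp only [pvChase]
      by_cases h : (rev.length : Int) + 1 = n
      · rw [if_pos h, if_pos (by simp [List.length_cons]; omega)]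
        have h1 : (n - rev.length).toNat = 1 := by omega
        simp [h1, List.reverse_cons]
      · rw [if_neg h]
        have hx := ih (x :: rev)
        simp only [List.length_cons] at hx
        have hc : ((rev.length + 1 : Nat) : Int) = (rev.length : Int) + 1 := by push_cast; ring
        rw [hc] at hx
        rw [hx]
        by_cases h2 : (rev.length : Int) < n ∧ n ≤ (rev.length : Int) + (xs.length + 1)
        · rw [if_pos (by omega), if_pos (by simp only [List.length_cons]; push_cast; omega)]
          have h3 : (n - rev.length).toNat = (n - (rev.length + 1)).toNat + 1 := by
            push_cast at h2; omega
          rw [h3, List.take_succ_cons]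
          simp [List.reverse_cons, List.append_assoc]
        · rw [if_neg (by omega), if_neg (by simp only [List.length_cons]; push_cast; omega)]
          simp only [List.reverse_cons, List.append_assoc, List.length_cons, List.cons_append,
            List.nil_append, Sum.inr.injEq, Prod.mk.injEq]
          exact ⟨trivial, by omega⟩

-- arithmetic range decomposition
theorem pv_map_range_mul {β : Type} (p q : Nat) (f : Nat → β) :
    (List.range (p * q)).map f =
      (List.range p).flatMap (fun i => (List.range q).map (fun j => f (i * q + j))) := by
  induction p with
  | zero => simp
  | succ p ih =>
      have h : (p + 1) * q = p * q + q := by ring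
      rw [h, List.range_add, List.map_append, ih, List.range_succ, List.flatMap_append]
      simp [List.map_map, Function.comp]

theorem pvLetters_eq : pvLetters = (List.range 26).map (fun i => Char.ofNat (65 + i)) := by
  decide

theorem pvInner_eq (a b c : Char) :
    (PySem.List.pyRange 0 1000 1).map (pvId a b c) =
      (List.range 1000).map (fun j : Nat => pvId a b c (j : Int)) := by
  rw [PySem.List.pyRange_one, List.map_map]
  have h : ((1000 : Int) - 0).toNat = 1000 := by decide
  rw [h]
  refine List.map_congr_left fun j hj => ?_
  show pvId a b c (0 + (j : Int)) = pvId a b c (j : Int)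
  rw [zero_add]

theorem pvIdx_decompose (i i2 i3 j : Nat) (_hi : i < 26) (hi2 : i2 < 26) (hi3 : i3 < 26)
    (hj : j < 1000) :
    pvIdx ((i * 676000 + (i2 * 26000 + (i3 * 1000 + j)) : Nat) : Int) =
      pvId (Char.ofNat (65 + i)) (Char.ofNat (65 + i2)) (Char.ofNat (65 + i3)) (j : Int) := by
  have h676 : PySem.Int.floordiv ((i * 676000 + (i2 * 26000 + (i3 * 1000 + j)) : Nat) : Int) 676000
      = (i : Int) := by
    rw [PySem.Int.floordiv_eq_iff_of_pos (by norm_num)]; push_cast; omega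
  have h26000 : PySem.Int.floordiv ((i * 676000 + (i2 * 26000 + (i3 * 1000 + j)) : Nat) : Int) 26000
      = (26 * i + i2 : Int) := by
    rw [PySem.Int.floordiv_eq_iff_of_pos (by norm_num)]; push_cast; omega
  have h1000 : PySem.Int.floordiv ((i * 676000 + (i2 * 26000 + (i3 * 1000 + j)) : Nat) : Int) 1000
      = (676 * i + 26 * i2 + i3 : Int) := by
    rw [PySem.Int.floordiv_eq_iff_of_pos (by norm_num)]; push_cast; omega
  have hm26a : PySem.Int.mod (26 * (i : Int) + (i2 : Int)) 26 = (i2 : Int) := by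
    rw [PySem.Int.mod_eq_emod_of_pos (by norm_num)]; omega
  have hm26b : PySem.Int.mod (676 * (i : Int) + 26 * (i2 : Int) + (i3 : Int)) 26 = (i3 : Int) := by
    rw [PySem.Int.mod_eq_emod_of_pos (by norm_num)]; omega
  have hm1000 : PySem.Int.mod ((i * 676000 + (i2 * 26000 + (i3 * 1000 + j)) : Nat) : Int) 1000
      = (j : Int) := by
    rw [PySem.Int.mod_eq_emod_of_pos (by norm_num)]; push_cast; omega
  have c1 : ∀ m : Nat, ((65 : Int) + (m : Int)).toNat = 65 + m := fun m => by omega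
  simp only [pvIdx, pvChr, h676, h26000, h1000, hm26a, hm26b, hm1000, c1]

theorem pvAll_eq : pvAll = (List.range 17576000).map (fun k : Nat => pvIdx (k : Int)) := by
  have e1 : (17576000 : Nat) = 26 * 676000 := by norm_num
  rw [e1, pv_map_range_mul]
  have e2 : (676000 : Nat) = 26 * 26000 := by norm_num
  rw [pvAll, pvLetters_eq, List.flatMap_map]
  refine List.flatMap_congr (fun i hi => ?_)
  rw [e2, pv_map_range_mul, List.flatMap_map]
  refine List.flatMap_congr (fun i2 hi2 => ?_)
  have e3 : (26000 : Nat) = 26 * 1000 := by norm_num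
  rw [e3, pv_map_range_mul, List.flatMap_map]
  refine List.flatMap_congr (fun i3 hi3 => ?_)
  rw [pvInner_eq]
  refine List.map_congr_left (fun j hj => ?_)
  simp only [List.mem_range] at hi hi2 hi3 hj
  exact (pvIdx_decompose i i2 i3 j hi hi2 hi3 hj).symm

theorem pvAll_length : pvAll.length = 17576000 := by
  rw [pvAll_eq]; simp

theorem pvAlt_eq (n : Int) :
    generate_user_ids_alt n =
      (List.range (min (max n 0) 17576000).toNat).map (fun k : Nat => pvIdx (k : Int)) := by
  have h : generate_user_ids_alt n =
      (PySem.List.pyRange 0 (min (max n 0) (26 * 26 * 26 * 1000)) 1).map pvIdx := rfl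
  rw [h, PySem.List.pyRange_one, List.map_map]
  have h2 : (min (max n 0) (26 * 26 * 26 * 1000) - 0).toNat = (min (max n 0) 17576000).toNat := by
    norm_num
  rw [h2]
  exact List.map_congr_left fun j hj => by show pvIdx (0 + (j : Int)) = pvIdx (j : Int); rw [zero_add]

theorem pv_take_all (m : Nat) (hm : m ≤ 17576000) :
    pvAll.take m = (List.range m).map (fun k : Nat => pvIdx (k : Int)) := by
  rw [pvAll_eq, ← List.map_take, List.take_range, Nat.min_eq_left hm]

theorem pvLoopA_all (n : Int) (st : List String × Int) :
    pvLoopA n pvLetters st = pvChase n pvAll st := by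
  rw [pvLoopA_eq_chase]; rfl

theorem pvChase_run (n : Int) (xs : List String) :
    pvChase n xs ([], 0) =
      if 0 < n ∧ n ≤ (xs.length : Int) then .inl (xs.take n.toNat)
      else .inr (xs.reverse, (xs.length : Int)) := by
  have h := pvChase_spec n xs []
  simp only [List.length_nil, Nat.cast_zero, zero_add, sub_zero, List.reverse_nil,
    List.nil_append, List.append_nil] at h
  exact h

theorem pvA_take (n : Int) : generate_user_ids n = pvAll.take (pvCountA n).toNat := by
  unfold generate_user_ids
  rw [pvLoopA_all]
  generalize hA : pvAll = A
  have hAlen : A.length = 17576000 := by rw [← hA, pvAll_length]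
  rw [pvChase_run]
  by_cases h : 0 < n ∧ n ≤ (A.length : Int)
  · rw [if_pos h]
    dsimp only
    have he : (pvCountA n).toNat = n.toNat := by simp only [pvCountA]; omega
    rw [he]
  · rw [if_neg h]
    dsimp only
    rw [List.reverse_reverse]
    by_cases hn : 0 ≤ n
    · rw [PySem.List.slice_to A hn]
      rcases Nat.le_total n.toNat A.length with hle | hge
      · have he : (pvCountA n).toNat = n.toNat := by simp only [pvCountA]; omega
        rw [he]
      · rw [List.take_of_length_le hge, List.take_of_length_le (by simp only [pvCountA]; omega)]
    · have hneg : n = -(((-n).toNat : Nat) : Int) := by omega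
      rw [hneg, PySem.List.slice_to_neg_natCast A _ (by omega)]
      have he : (pvCountA (-(((-n).toNat : Nat) : Int))).toNat = A.length - (-n).toNat := by
        simp only [pvCountA]; omega
      rw [he]

-- ===== VERDICT (by name: the statement is the Claim_ definition above) =====
theorem generate_user_ids_spec : Claim_equal_generate_user_ids := by
  intro n _ hpre
  show generate_user_ids n = generate_user_ids_alt n
  rw [pvA_take, pvAlt_eq]
  have hn : (0 : Int) ≤ n := hpre
  have he : (pvCountA n).toNat = (min (max n 0) 17576000).toNat := by
    simp only [pvCountA]; omega
  rw [he, pv_take_all _ (by omega)]
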